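-- pv_equiv track=rewrite | github.com/harshilkhara/LeetCode_qts | removeDuplicateString.py | removeDuplicateString2
-- ===== SOURCE A (Python) =====
-- def removeDuplicateString2(s,k): # TC O(n) // SC O(n)
-- 	result=list(s)
-- 	stack=[]
-- 	i=0
-- 	#for i in range(len(result)):
-- 	while i < len(result):
-- 	    if i==0 or result[i]!=result[i-1]:
-- 	        stack.append(1)
-- 	    else:
-- 	        incremented=stack.pop()+1
-- 	        if incremented==k:
-- 	            del result[i-k+1:i+1]
-- 	            i=i-k
-- 	        else:
-- 	            stack.append(incremented)
-- 	    i+=1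
--
-- 	return "".join(result)
-- ===== SOURCE B (Python) =====
-- def removeDuplicateString2(s, k):
--     stack = []  # pairs (char, run length), top at the end
--     for c in s:
--         if stack and stack[-1][0] == c:
--             n = stack[-1][1] + 1
--             if n == k:
--                 stack.pop()
--             else:
--                 stack[-1] = (c, n)
--         else:
--             stack.append((c, 1))
--     return "".join(c * n for c, n in stack)
-- ===== Notes on version B (the rewrite author's own statement) =====
-- stated objective: alternative
-- what changed: Replaces A's mutable character-list simulation (counter stack, slice deletion of k characters and index rewinding on each removal) by a single forward pass keeping a stack of (char, run-length) pairs that is popped when a run reaches k and joined at the end.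
import Mathlib
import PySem

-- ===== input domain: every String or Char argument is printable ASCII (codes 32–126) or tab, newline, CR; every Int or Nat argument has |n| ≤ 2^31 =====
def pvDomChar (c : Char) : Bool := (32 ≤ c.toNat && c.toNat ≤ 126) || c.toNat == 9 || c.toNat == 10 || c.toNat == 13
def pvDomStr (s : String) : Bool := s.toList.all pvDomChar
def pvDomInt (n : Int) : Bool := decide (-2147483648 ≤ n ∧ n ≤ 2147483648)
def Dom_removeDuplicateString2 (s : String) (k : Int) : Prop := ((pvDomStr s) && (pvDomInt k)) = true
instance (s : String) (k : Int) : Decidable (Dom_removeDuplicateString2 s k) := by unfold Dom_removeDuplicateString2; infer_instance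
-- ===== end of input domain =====

-- B replaces A's mutable result-list simulation (with slice deletion and index rewinding)
-- by a single pass over the string keeping a stack of (char, run-length) pairs; objective: alternative.
-- Ports: Python list-stacks (append/pop at the end) are transcribed with the top at the head of a Lean list.


-- ===== PORT A =====
-- the while loop; i is kept as a Nat and the slice deletion as take/drop: on every reachable state
-- i ≥ 0 and (at a deletion) 2 ≤ k ≤ i+1, so this is exact (the Nat clamping only makes the recursion total).
-- Each pass decreases result.length - i by exactly 1, so fuel = length result makes the recursion
-- structural without cutting any iteration short.
def pvLoopA : Nat → List Char → Nat → List Int → Int → List Char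
  | 0, result, _, _, _ => result
  | fuel + 1, result, i, stack, k =>
    if i < result.length then
      if i == 0 || result.getD i ' ' != result.getD (i - 1) ' ' then
        pvLoopA fuel result (i + 1) (1 :: stack) k
      else
        let incremented := stack.headD 0 + 1
        if incremented == k then
          pvLoopA fuel (result.take (i + 1 - k.toNat) ++ result.drop (i + 1)) (i + 1 - k.toNat) stack.tail k
        else
          pvLoopA fuel result (i + 1) (incremented :: stack.tail) k
    else result

def removeDuplicateString2 (s : String) (k : Int) : String :=
  String.mk (pvLoopA s.toList.length s.toList 0 [] k)

-- ===== PORT B =====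
def pvLoopB (cs : List Char) (stack : List (Char × Int)) (k : Int) : List (Char × Int) :=
  match cs with
  | [] => stack
  | c :: rest =>
    match stack with
    | (c', n) :: tl =>
      if c' = c then
        if n + 1 == k then pvLoopB rest tl k
        else pvLoopB rest ((c', n + 1) :: tl) k
      else pvLoopB rest ((c, 1) :: (c', n) :: tl) k
    | [] => pvLoopB rest [(c, 1)] k

-- the final "".join(c * n for c, n in stack) (stack is top-at-head, so joined in reverse)
def pvRender (stack : List (Char × Int)) : List Char :=
  stack.reverse.flatMap (fun p => List.replicate p.2.toNat p.1)

def removeDuplicateString2_alt (s : String) (k : Int) : String :=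
  String.mk (pvRender (pvLoopB s.toList [] k))

-- ===== PRECONDITION & SPEC =====
def Spec_removeDuplicateString2 (s : String) (k : Int) (out : String) : Prop := out = removeDuplicateString2_alt s k
instance (s : String) (k : Int) (out : String) : Decidable (Spec_removeDuplicateString2 s k out) := by unfold Spec_removeDuplicateString2; infer_instance

-- ===== CLAIM (what is proved, stated in full; the proofs are below) =====
def Claim_equal_removeDuplicateString2 : Prop := ∀ (s : String) (k : Int), Dom_removeDuplicateString2 s k → Spec_removeDuplicateString2 s k (removeDuplicateString2 s k)

-- ===== LEMMAS AND PROOFS =====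

-- every run length on B's stack is at least 1
def pvWF (stack : List (Char × Int)) : Prop := ∀ p ∈ stack, 1 ≤ p.2

lemma pvRender_cons (c : Char) (n : Int) (tl : List (Char × Int)) :
    pvRender ((c, n) :: tl) = pvRender tl ++ List.replicate n.toNat c := by
  simp [pvRender]

lemma getD_mid (xs ys : List Char) (y d : Char) : (xs ++ y :: ys).getD xs.length d = y := by
  simp [List.getD_eq_getElem?_getD]

lemma pv_take_append {α : Type} (xs ys : List α) : (xs ++ ys).take xs.length = xs := by
  induction xs with
  | nil => simp
  | cons a xs ih => simpa using ih

lemma pv_drop_append_cons {α : Type} (xs ys : List α) (y : α) :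
    (xs ++ y :: ys).drop (xs.length + 1) = ys := by
  induction xs with
  | nil => simp
  | cons a xs ih => simpa using ih

-- main invariant: A's loop run from the state corresponding to B's stack computes B's answer
lemma pvLoop_eq (rem : List Char) : ∀ (bs : List (Char × Int)) (k : Int), pvWF bs →
    pvLoopA rem.length (pvRender bs ++ rem) (pvRender bs).length (bs.map Prod.snd) k
      = pvRender (pvLoopB rem bs k) := by
  induction rem with
  | nil =>
    intro bs k _
    simp [pvLoopA, pvLoopB]
  | cons c rest ih =>
    intro bs k hwf
    show (if (pvRender bs).length < (pvRender bs ++ c :: rest).length then _ else _) = _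
    have hlt : (pvRender bs).length < (pvRender bs ++ c :: rest).length := by simp
    rw [if_pos hlt]
    match bs with
    | [] =>
      simp only [pvRender, List.reverse_nil, List.flatMap_nil, List.length_nil, List.nil_append]
      have : pvLoopB (c :: rest) [] k = pvLoopB rest [(c, 1)] k := by simp [pvLoopB]
      rw [this]
      have h1 := ih [(c, 1)] k (by intro p hp; simp at hp; simp [hp])
      simpa [pvRender] using h1
    | (c', n) :: tl =>
      have hn : 1 ≤ n := hwf (c', n) (List.mem_cons_self ..)
      have hwf' : pvWF tl := fun p hp => hwf p (List.mem_cons_of_mem _ hp)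
      have hnen : (pvRender ((c', n) :: tl)).length ≠ 0 := by
        simp [pvRender_cons]
        omega
      -- result[i] = c, result[i-1] = c'
      have hgi : (pvRender ((c', n) :: tl) ++ c :: rest).getD (pvRender ((c', n) :: tl)).length ' ' = c :=
        getD_mid _ _ _ _
      have hsplit : pvRender ((c', n) :: tl) = (pvRender tl ++ List.replicate (n.toNat - 1) c') ++ [c'] := by
        rw [pvRender_cons]
        have : List.replicate n.toNat c' = List.replicate (n.toNat - 1) c' ++ [c'] := by
          have h2 : n.toNat = (n.toNat - 1) + 1 := by omega
          rw [h2, List.replicate_succ']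
          simp
        rw [this, List.append_assoc]
      have hgi1 : (pvRender ((c', n) :: tl) ++ c :: rest).getD ((pvRender ((c', n) :: tl)).length - 1) ' ' = c' := by
        conv_lhs => rw [hsplit]
        have hl : ((pvRender tl ++ List.replicate (n.toNat - 1) c') ++ [c']).length - 1
            = (pvRender tl ++ List.replicate (n.toNat - 1) c').length := by simp
        rw [hl, List.append_assoc]
        exact getD_mid _ _ _ _
      by_cases hc : c' = c
      · -- same char: A takes the else branch
        subst hc
        rw [if_neg (by
          simp only [Bool.or_eq_true, beq_iff_eq, bne_iff_ne, ne_eq, not_or, not_not]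
          exact ⟨hnen, by rw [hgi, hgi1]⟩)]
        simp only [List.map_cons, List.headD_cons, List.tail_cons]
        have hloopB : pvLoopB (c' :: rest) ((c', n) :: tl) k
            = if n + 1 == k then pvLoopB rest tl k else pvLoopB rest ((c', n + 1) :: tl) k := by
          simp [pvLoopB]
        by_cases hk : n + 1 = k
        · rw [if_pos (by simp [hk]), hloopB, if_pos (by simp [hk])]
          -- deletion: take (i+1-k) ++ drop (i+1) = pvRender tl ++ rest
          have hkn : k.toNat = n.toNat + 1 := by omega
          have hlen : (pvRender ((c', n) :: tl)).length = (pvRender tl).length + n.toNat := by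
            simp [pvRender_cons]
          have htak : (pvRender ((c', n) :: tl)).length + 1 - k.toNat = (pvRender tl).length := by
            omega
          have hR : pvRender ((c', n) :: tl) ++ c' :: rest
              = (pvRender tl ++ List.replicate n.toNat c') ++ c' :: rest := by
            rw [pvRender_cons]
          have hidx : (pvRender ((c', n) :: tl)).length + 1
              = (pvRender tl ++ List.replicate n.toNat c').length + 1 := by
            rw [pvRender_cons]
          have hres : (pvRender ((c', n) :: tl) ++ c' :: rest).take ((pvRender ((c', n) :: tl)).length + 1 - k.toNat)
              ++ (pvRender ((c', n) :: tl) ++ c' :: rest).drop ((pvRender ((c', n) :: tl)).length + 1)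
              = pvRender tl ++ rest := by
            rw [htak, hR, hidx, pv_drop_append_cons]
            congr 1
            rw [List.append_assoc]
            exact pv_take_append _ _
          rw [hres, htak]
          exact ih tl k hwf'
        · rw [if_neg (by simp [hk]), hloopB, if_neg (by simp [hk])]
          have hres : pvRender ((c', n) :: tl) ++ c' :: rest = pvRender ((c', n + 1) :: tl) ++ rest := by
            rw [pvRender_cons, pvRender_cons]
            have : List.replicate (n + 1).toNat c' = List.replicate n.toNat c' ++ [c'] := by
              rw [show (n + 1).toNat = n.toNat + 1 by omega, List.replicate_succ']
            rw [this]
            simp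
          have hlen : (pvRender ((c', n) :: tl)).length + 1 = (pvRender ((c', n + 1) :: tl)).length := by
            have := congrArg List.length hres
            simp at this
            omega
          rw [hres, hlen]
          have h1 := ih ((c', n + 1) :: tl) k (by
            intro p hp
            rcases List.mem_cons.1 hp with h | h
            · subst h; simp; omega
            · exact hwf' p h)
          simpa using h1
      · -- different char: A pushes 1
        rw [if_pos (by
          simp only [Bool.or_eq_true, beq_iff_eq, bne_iff_ne, ne_eq]
          exact Or.inr (by rw [hgi, hgi1]; exact fun h => hc h.symm))]
        have hloopB : pvLoopB (c :: rest) ((c', n) :: tl) k = pvLoopB rest ((c, 1) :: (c', n) :: tl) k := by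
          simp [pvLoopB, hc]
        rw [hloopB]
        have hres : pvRender ((c', n) :: tl) ++ c :: rest = pvRender ((c, 1) :: (c', n) :: tl) ++ rest := by
          rw [pvRender_cons (c : Char) 1]
          simp
        have hlen : (pvRender ((c', n) :: tl)).length + 1 = (pvRender ((c, 1) :: (c', n) :: tl)).length := by
          have := congrArg List.length hres
          simp at this
          omega
        rw [hres, hlen]
        have h1 := ih ((c, 1) :: (c', n) :: tl) k (by
          intro p hp
          rcases List.mem_cons.1 hp with h | h
          · subst h; simp
          · exact hwf p h)
        simpa using h1

-- ===== VERDICT (by name: the statement is the Claim_ definition above) =====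
theorem removeDuplicateString2_spec : Claim_equal_removeDuplicateString2 := by
  intro s k _
  unfold Spec_removeDuplicateString2 removeDuplicateString2 removeDuplicateString2_alt
  refine congrArg String.mk ?_
  have h := pvLoop_eq s.toList [] k (by intro p hp; simp at hp)
  simpa [pvRender] using h
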